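-- pv_equiv track=rewrite | github.com/traneo/neoflow | neoflow/gitlab/indexer.py | _compute_line_ranges
-- ===== SOURCE A (Python) =====
-- def _compute_line_ranges(content: str, chunks: list[str]) -> list[tuple[int, int]]:
--     """Compute (line_start, line_end) for each chunk within the full file content.
--
--     Line numbers are 1-based.
--     """
--     ranges = []
--     search_from = 0
--     for chunk in chunks:
--         start_idx = content.find(chunk[:80], search_from)
--         if start_idx == -1:
--             start_idx = search_from
--
--         line_start = content[:start_idx].count("\n") + 1
--         line_end = line_start + chunk.count("\n")
--         ranges.append((line_start, line_end))
--         search_from = start_idx + len(chunk) // 2  # advance past overlap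
--     return ranges
-- ===== SOURCE B (Python) =====
-- def _compute_line_ranges(content: str, chunks: list[str]) -> list[tuple[int, int]]:
--     """Compute (line_start, line_end) for each chunk within the full file content.
--
--     Line numbers are 1-based.  Uses a prefix newline-count table built once,
--     so each chunk's starting line is an O(1) lookup instead of an O(n) scan.
--     """
--     n = len(content)
--     prefix = [0]
--     acc = 0
--     for ch in content:
--         if ch == "\n":
--             acc += 1
--         prefix.append(acc)
--     ranges = []
--     search_from = 0
--     for chunk in chunks:
--         start_idx = content.find(chunk[:80], search_from)
--         if start_idx == -1:
--             start_idx = search_from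
--         idx = start_idx if start_idx < n else n
--         line_start = prefix[idx] + 1
--         ranges.append((line_start, line_start + chunk.count("\n")))
--         search_from = start_idx + len(chunk) // 2
--     return ranges
-- ===== Notes on version B (the rewrite author's own statement) =====
-- stated objective: faster
-- what changed: B builds a prefix newline-count table over the content once and replaces A's per-chunk content[:start_idx].count('\n') scan by an O(1) table lookup.
import Mathlib
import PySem

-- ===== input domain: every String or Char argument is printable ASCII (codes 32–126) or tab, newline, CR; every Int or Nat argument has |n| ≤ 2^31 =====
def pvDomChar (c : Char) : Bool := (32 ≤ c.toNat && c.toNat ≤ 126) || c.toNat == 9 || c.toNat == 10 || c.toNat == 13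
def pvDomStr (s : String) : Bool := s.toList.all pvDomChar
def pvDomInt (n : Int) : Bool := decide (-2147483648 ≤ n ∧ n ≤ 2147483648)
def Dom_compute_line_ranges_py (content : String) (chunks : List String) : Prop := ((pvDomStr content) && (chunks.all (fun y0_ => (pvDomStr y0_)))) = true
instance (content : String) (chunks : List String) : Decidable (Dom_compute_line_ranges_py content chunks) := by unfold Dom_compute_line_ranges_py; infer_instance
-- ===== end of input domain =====

-- B replaces A's per-chunk `content[:start_idx].count("\n")` prefix scan by a prefix
-- newline-count table built once, so each chunk's starting line is a single table lookup.

-- ===== PORT A =====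
-- one iteration of A's `for chunk in chunks` loop; state = (ranges, search_from)
def pvStepA (content : String) (st : List (Int × Int) × Int) (chunk : String) :
    List (Int × Int) × Int :=
  let f := PySem.Str.findFrom content (PySem.Str.slice chunk none (some 80)) st.2 none
  let start_idx : Int := if f = -1 then st.2 else f
  let line_start : Int := (PySem.Str.count (PySem.Str.slice content none (some start_idx)) "\n" : Int) + 1
  let line_end : Int := line_start + (PySem.Str.count chunk "\n" : Int)
  (st.1 ++ [(line_start, line_end)], start_idx + PySem.Int.floordiv (PySem.Str.len chunk) 2)

def compute_line_ranges_py (content : String) (chunks : List String) : List (Int × Int) :=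
  (chunks.foldl (pvStepA content) ([], 0)).1

-- ===== PORT B =====
-- one step of B's table-building loop: append the running newline count
def pvPrefixStep (st : List Nat × Nat) (ch : Char) : List Nat × Nat :=
  let acc := if ch = '\n' then st.2 + 1 else st.2
  (st.1 ++ [acc], acc)

-- one iteration of B's `for chunk in chunks` loop; state = (ranges, search_from)
def pvStepB (content : String) (n : Int) (pfx : List Nat) (st : List (Int × Int) × Int)
    (chunk : String) : List (Int × Int) × Int :=
  let f := PySem.Str.findFrom content (PySem.Str.slice chunk none (some 80)) st.2 none
  let start_idx : Int := if f = -1 then st.2 else f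
  let idx : Int := if start_idx < n then start_idx else n
  let line_start : Int := ((PySem.List.pyGetD pfx idx 0 : Nat) : Int) + 1
  (st.1 ++ [(line_start, line_start + (PySem.Str.count chunk "\n" : Int))],
   start_idx + PySem.Int.floordiv (PySem.Str.len chunk) 2)

def compute_line_ranges_py_alt (content : String) (chunks : List String) : List (Int × Int) :=
  let n : Int := PySem.Str.len content
  let pr := content.toList.foldl pvPrefixStep ([0], 0)
  (chunks.foldl (pvStepB content n pr.1) ([], 0)).1

-- ===== PRECONDITION & SPEC =====
def Spec_compute_line_ranges_py (content : String) (chunks : List String) (out : List (Int × Int)) : Prop := out = compute_line_ranges_py_alt content chunks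
instance (content : String) (chunks : List String) (out : List (Int × Int)) : Decidable (Spec_compute_line_ranges_py content chunks out) := by unfold Spec_compute_line_ranges_py; infer_instance

-- ===== CLAIM (what is proved, stated in full; the proofs are below) =====
def Claim_equal_compute_line_ranges_py : Prop := ∀ (content : String) (chunks : List String), Dom_compute_line_ranges_py content chunks → Spec_compute_line_ranges_py content chunks (compute_line_ranges_py content chunks)

-- ===== LEMMAS AND PROOFS =====

-- Python's str.count for a single-character needle is List.count
theorem pvCount_go_singleton (c : Char) (l : List Char) (acc fuel : Nat)
    (h : l.length ≤ fuel) :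
    PySem.Chars.count.go [c] fuel l acc = acc + l.count c := by
  induction l generalizing acc fuel with
  | nil => cases fuel <;> simp [PySem.Chars.count.go]
  | cons x t ih =>
    cases fuel with
    | zero => simp at h
    | succ m =>
      simp only [PySem.Chars.count.go]
      by_cases hx : c = x
      · subst hx
        simp only [List.isPrefixOf, BEq.rfl, Bool.true_and, if_true, List.length_singleton,
          List.drop_succ_cons, List.drop_zero]
        rw [ih _ m (by simpa using h)]
        simp
        omega
      · have hp : ([c].isPrefixOf (x :: t)) = false := by
          simp [List.isPrefixOf, hx]
        rw [hp]
        simp only [Bool.false_eq_true, if_false]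
        rw [ih _ m (by simpa using h)]
        simp only [List.count_cons]
        have : ¬ x = c := fun he => hx he.symm
        simp [this]

theorem pvCount_singleton (l : List Char) (c : Char) :
    PySem.Chars.count l [c] = l.count c := by
  simp only [PySem.Chars.count]
  simp [pvCount_go_singleton c l 0 l.length (le_refl _)]

-- the prefix table built by B's first loop, characterised
theorem pvPrefix_foldl (s : List Char) (pre : List Nat) (acc : Nat) :
    (s.foldl pvPrefixStep (pre, acc)).1
      = pre ++ (List.range s.length).map (fun j => acc + ((s.take (j+1)).count '\n')) := by
  induction s generalizing pre acc with
  | nil => simp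
  | cons c t ih =>
    simp only [List.foldl_cons]
    rw [show pvPrefixStep (pre, acc) c
        = (pre ++ [if c = '\n' then acc + 1 else acc], if c = '\n' then acc + 1 else acc) from rfl]
    rw [ih]
    rw [List.length_cons, List.range_succ_eq_map]
    simp only [List.map_cons, List.map_map, List.append_assoc, List.singleton_append]
    congr 1
    by_cases hc : c = '\n' <;>
      simp [hc, List.take_succ_cons] <;> intros <;> omega

theorem pvPrefix_getD (s : List Char) (k : Nat) (hk : k ≤ s.length) :
    ((s.foldl pvPrefixStep ([0], 0)).1).getD k 0 = (s.take k).count '\n' := by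
  rw [pvPrefix_foldl]
  cases k with
  | zero => simp
  | succ j =>
    have hj : j < s.length := by omega
    rw [List.singleton_append, List.getD_cons_succ, List.getD_eq_getElem?_getD,
      List.getElem?_map, List.getElem?_range hj]
    simp

-- A's find result is nonnegative whenever it is not -1 and the start index is nonnegative
theorem pvFindFrom_nonneg (s sub : List Char) (a : Int) (ha : 0 ≤ a)
    (h : PySem.Chars.findFrom s sub a none ≠ -1) :
    0 ≤ PySem.Chars.findFrom s sub a none := by
  simp only [PySem.Chars.findFrom] at *
  split_ifs at * <;>
    first
    | omega
    | (rename_i hf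
       have h9 := (PySem.Chars.find_nonneg_iff _ sub).mpr
         ((PySem.Chars.find_ne_neg_one_iff _ sub).mp hf)
       omega)

-- A's prefix scan equals B's clamped table lookup
theorem pvCountPrefix (s : List Char) (i : Int) (hi : 0 ≤ i)
    (pfx : List Nat) (hp : ∀ k ≤ s.length, pfx.getD k 0 = (s.take k).count '\n') :
    PySem.List.pyGetD pfx (if i < (s.length : Int) then i else (s.length : Int)) 0
      = (s.take i.toNat).count '\n' := by
  by_cases h : i < (s.length : Int)
  · rw [if_pos h, PySem.List.pyGetD_of_nonneg pfx 0 hi, hp i.toNat (by omega)]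
  · rw [if_neg h, PySem.List.pyGetD_of_nonneg pfx 0 (by positivity),
      hp (s.length : Int).toNat (by simp)]
    simp only [Int.toNat_natCast]
    rw [List.take_of_length_le (le_refl _), List.take_of_length_le (by omega)]

-- the two loop bodies agree on any state with nonneg search_from, which stays nonneg
theorem pvStep_eq (content : String) (st : List (Int × Int) × Int) (chunk : String)
    (h : 0 ≤ st.2) :
    pvStepA content st chunk
      = pvStepB content (PySem.Str.len content)
          ((content.toList.foldl pvPrefixStep ([0], 0)).1) st chunk
    ∧ 0 ≤ (pvStepA content st chunk).2 := by
  simp only [pvStepA, pvStepB]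
  have hstart : 0 ≤ (if PySem.Str.findFrom content (PySem.Str.slice chunk none (some 80)) st.2 none = -1
      then st.2 else PySem.Str.findFrom content (PySem.Str.slice chunk none (some 80)) st.2 none) := by
    split_ifs with hne
    · exact h
    · rw [PySem.Str.findFrom_eq] at hne ⊢
      exact pvFindFrom_nonneg _ _ _ h hne
  set si : Int := (if PySem.Str.findFrom content (PySem.Str.slice chunk none (some 80)) st.2 none = -1
      then st.2 else PySem.Str.findFrom content (PySem.Str.slice chunk none (some 80)) st.2 none) with hsi
  have hcount : (PySem.Str.count (PySem.Str.slice content none (some si)) "\n" : Nat)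
      = PySem.List.pyGetD ((content.toList.foldl pvPrefixStep ([0], 0)).1)
          (if si < PySem.Str.len content then si else PySem.Str.len content) 0 := by
    rw [PySem.Str.count_eq, PySem.Str.toList_slice, PySem.Chars.slice_eq_listSlice,
      PySem.List.slice_to content.toList hstart]
    have hnl : ("\n" : String).toList = ['\n'] := rfl
    rw [hnl, pvCount_singleton, PySem.Str.len_eq]
    exact (pvCountPrefix content.toList si hstart _
      (fun k hk => pvPrefix_getD content.toList k hk)).symm
  constructor
  · simp only [hcount]
  · have hfd : 0 ≤ PySem.Int.floordiv (PySem.Str.len chunk) 2 := by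
      rw [PySem.Int.floordiv_eq_ediv_of_pos (by norm_num), PySem.Str.len_eq]
      exact Int.ediv_nonneg (by positivity) (by norm_num)
    omega

theorem pvFold_eq (content : String) (chunks : List String)
    (st : List (Int × Int) × Int) (h : 0 ≤ st.2) :
    chunks.foldl (pvStepA content) st
      = chunks.foldl (pvStepB content (PySem.Str.len content)
          ((content.toList.foldl pvPrefixStep ([0], 0)).1)) st := by
  induction chunks generalizing st with
  | nil => rfl
  | cons c t ih =>
    simp only [List.foldl_cons]
    obtain ⟨he, hn⟩ := pvStep_eq content st c h
    rw [← he]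
    exact ih _ hn

-- ===== VERDICT (by name: the statement is the Claim_ definition above) =====
theorem compute_line_ranges_py_spec : Claim_equal_compute_line_ranges_py := by
  intro content chunks _
  unfold Spec_compute_line_ranges_py compute_line_ranges_py compute_line_ranges_py_alt
  rw [pvFold_eq content chunks ([], 0) (by norm_num)]
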